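-- pv_equiv track=rewrite | github.com/PhoenixIIexe/predprofit | task4.py | group_by_game
-- ===== SOURCE A (Python) =====
-- from typing import List, Dict
--
-- def group_by_game(table: List[List[str]]) -> Dict[str, Dict[str, List[str]]]:
--     """
--     Группиовка по названием игр
--
--     table - данные таблицы
--     """
--
--     res = {}
--     for row in table:
--         game_name, character, name_error, _ = row
--         if game_name not in res:
--             res[game_name] = {}
--         if character not in res[game_name]:
--             res[game_name][character] = []
--         res[game_name][character].append(name_error)
--
--     return res
-- ===== SOURCE B (Python) =====
-- from typing import List, Dict
--
--
-- def group_by_game(table: List[List[str]]) -> Dict[str, Dict[str, List[str]]]: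
--     """Group table rows as {game: {character: [name_errors]}} via comprehensions."""
--     rows = [(g, c, e) for g, c, e, _ in table]
--     return {
--         g: {
--             c: [e for g2, c2, e in rows if g2 == g and c2 == c]
--             for c in dict.fromkeys(c2 for g2, c2, _ in rows if g2 == g)
--         }
--         for g in dict.fromkeys(g for g, _, _ in rows)
--     }
-- ===== Notes on version B (the rewrite author's own statement) =====
-- stated objective: alternative
-- what changed: B replaces A's single mutating pass with nested-dict membership tests by a declarative rebuild: it extracts the (game, character, error) triples once, computes the ordered distinct games and per-game distinct characters with dict.fromkeys, and fills each error list by a filtering comprehension over the rows.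
import Mathlib
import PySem

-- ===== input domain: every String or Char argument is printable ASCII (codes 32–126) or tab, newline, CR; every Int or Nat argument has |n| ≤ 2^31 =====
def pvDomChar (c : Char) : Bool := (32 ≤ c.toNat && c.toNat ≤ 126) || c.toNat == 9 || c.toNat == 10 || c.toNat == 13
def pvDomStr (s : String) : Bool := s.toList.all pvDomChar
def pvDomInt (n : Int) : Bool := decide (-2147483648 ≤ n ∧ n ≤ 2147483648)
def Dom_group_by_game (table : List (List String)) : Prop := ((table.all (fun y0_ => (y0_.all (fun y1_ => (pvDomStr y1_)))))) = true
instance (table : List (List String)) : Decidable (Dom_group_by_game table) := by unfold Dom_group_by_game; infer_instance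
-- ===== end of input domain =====

-- B rebuilds the grouping declaratively (dedup of games/characters + filtering comprehensions)
-- instead of A's single mutating pass over nested dicts; alternative decomposition, not faster.


-- ===== PORT A =====
def group_by_game (table : List (List String)) : List (String × List (String × List String)) :=
  let res : PySem.Dict String (PySem.Dict String (List String)) :=
    table.foldl (fun res row =>
      match row with
      | [game_name, character, name_error, _] =>
        let res := if res.contains game_name then res else res.insert game_name PySem.Dict.empty
        let inner := res.getD game_name PySem.Dict.empty
        let inner := if inner.contains character then inner else inner.insert character []
        let inner := inner.insert character (inner.getD character [] ++ [name_error])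
        res.insert game_name inner
      | _ => res) PySem.Dict.empty
  res.items.map (fun p => (p.1, p.2.items))

-- ===== PORT B =====
-- '(g, c, e, _) for g, c, e, _ in table': keep exactly the length-4 rows' first three fields
def pvRows (table : List (List String)) : List (String × String × String) :=
  table.filterMap (fun r =>
    if r.length = 4 then some (r.headI, r.tail.headI, r.tail.tail.headI) else none)

def group_by_game_alt (table : List (List String)) : List (String × List (String × List String)) :=
  let rows := pvRows table
  (PySem.List.dedup (rows.map (fun t => t.1))).map (fun g =>
    (g, (PySem.List.dedup ((rows.filter (fun t => t.1 == g)).map (fun t => t.2.1))).map (fun c =>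
      (c, (rows.filter (fun t => t.1 == g && t.2.1 == c)).map (fun t => t.2.2)))))

-- ===== PRECONDITION & SPEC =====
-- Pre_ excludes only rows whose length is not 4: there Python A raises ValueError on unpacking (and B raises the same way).
def Pre_group_by_game (table : List (List String)) : Prop := ∀ r ∈ table, r.length = 4
instance (table : List (List String)) : Decidable (Pre_group_by_game table) := by unfold Pre_group_by_game; infer_instance
def pvWitness_group_by_game : List (List String) := [["g1", "c1", "e1", "x"], ["g1", "c1", "e2", "x"], ["g2", "c1", "e3", "x"]]

def Spec_group_by_game (table : List (List String)) (out : List (String × List (String × List String))) : Prop := out = group_by_game_alt table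
instance (table : List (List String)) (out : List (String × List (String × List String))) : Decidable (Spec_group_by_game table out) := by unfold Spec_group_by_game; infer_instance

-- ===== CLAIM (what is proved, stated in full; the proofs are below) =====
def Claim_equal_group_by_game : Prop := ∀ (table : List (List String)), Dom_group_by_game table → Pre_group_by_game table → Spec_group_by_game table (group_by_game table)

-- ===== LEMMAS AND PROOFS =====

-- the semantic step of A's loop, on the extracted triple
def pvStep (d : PySem.Dict String (PySem.Dict String (List String))) (t : String × String × String) :
    PySem.Dict String (PySem.Dict String (List String)) :=
  d.modify t.1 PySem.Dict.empty (fun i => i.modify t.2.1 [] (· ++ [t.2.2]))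

lemma innerStep_eq (i : PySem.Dict String (List String)) (c e : String) :
    (let i2 := if i.contains c then i else i.insert c []
     i2.insert c (i2.getD c [] ++ [e])) = i.modify c [] (· ++ [e]) := by
  by_cases hc : i.contains c = true
  · simp [hc, PySem.Dict.modify]
  · simp only [Bool.not_eq_true] at hc
    simp [hc, PySem.Dict.modify, PySem.Dict.getD_insert_self, PySem.Dict.insert_insert_self,
      PySem.Dict.getD_of_not_contains _ _ hc]

lemma stepA_eq (d : PySem.Dict String (PySem.Dict String (List String))) (g c e : String) :
    (let res := if d.contains g then d else d.insert g PySem.Dict.empty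
     let inner := res.getD g PySem.Dict.empty
     let inner := if inner.contains c then inner else inner.insert c []
     let inner := inner.insert c (inner.getD c [] ++ [e])
     res.insert g inner) = pvStep d (g, c, e) := by
  simp only [pvStep]
  by_cases hg : d.contains g = true
  · rw [if_pos hg, innerStep_eq (d.getD g PySem.Dict.empty) c e]
    simp [PySem.Dict.modify]
  · simp only [Bool.not_eq_true] at hg
    rw [if_neg (by simp [hg]), PySem.Dict.getD_insert_self, innerStep_eq PySem.Dict.empty c e]
    rw [PySem.Dict.insert_insert_self]
    simp [PySem.Dict.modify, PySem.Dict.getD_of_not_contains _ _ hg]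

lemma foldA_eq_rows (table : List (List String)) (d : PySem.Dict String (PySem.Dict String (List String)))
    (h : Pre_group_by_game table) :
    table.foldl (fun res row =>
      match row with
      | [game_name, character, name_error, _] =>
        let res := if res.contains game_name then res else res.insert game_name PySem.Dict.empty
        let inner := res.getD game_name PySem.Dict.empty
        let inner := if inner.contains character then inner else inner.insert character []
        let inner := inner.insert character (inner.getD character [] ++ [name_error])
        res.insert game_name inner
      | _ => res) d = (pvRows table).foldl pvStep d := by
  induction table generalizing d with
  | nil => rfl
  | cons r t ih =>
    obtain ⟨a, b, c, e, rfl⟩ := List.length_eq_four.mp (h r (by simp))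
    simp only [List.foldl_cons, pvRows, List.filterMap_cons]
    rw [ih _ (fun r hr => h r (by simp [hr]))]
    rw [stepA_eq d a b c]
    rfl

lemma outer_getD (rows : List (String × String × String)) (d : PySem.Dict String (PySem.Dict String (List String))) (g : String) :
    (rows.foldl pvStep d).getD g PySem.Dict.empty =
      (rows.filter (fun t => t.1 == g)).foldl
        (fun i t => i.modify t.2.1 [] (· ++ [t.2.2])) (d.getD g PySem.Dict.empty) := by
  induction rows generalizing d with
  | nil => rfl
  | cons t ts ih =>
    simp only [List.foldl_cons, List.filter_cons]
    by_cases ht : t.1 = g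
    · rw [if_pos (by simp [ht]), List.foldl_cons, ih]
      simp [pvStep, ht, PySem.Dict.getD_modify_self]
    · rw [if_neg (by simp [ht]), ih]
      simp [pvStep, PySem.Dict.getD_modify_of_ne _ _ _ (Ne.symm ht)]

lemma grouped_items_eq (table : List (List String)) :
    ((pvRows table).foldl pvStep PySem.Dict.empty).items.map (fun p => (p.1, p.2.items)) =
      group_by_game_alt table := by
  have hps : pvStep = fun d (t : String × String × String) =>
      d.modify t.1 PySem.Dict.empty (fun i => i.modify t.2.1 [] (· ++ [t.2.2])) := rfl
  set rows := pvRows table with hrows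
  have hnodup : ((rows.foldl pvStep PySem.Dict.empty).keys).Nodup := by
    rw [hps]
    exact PySem.Dict.nodup_keys_foldl_modify_key rows (fun t => t.1) _ _ _ PySem.Dict.nodup_keys_empty
  have hkeys : (rows.foldl pvStep PySem.Dict.empty).keys = PySem.List.dedup (rows.map (fun t => t.1)) := by
    rw [hps]
    rw [PySem.Dict.keys_foldl_modify_key rows (fun t => t.1) PySem.Dict.empty
      (fun _ t => fun i => i.modify t.2.1 [] (· ++ [t.2.2])) PySem.Dict.empty]
    simp [PySem.Set.update_nil_left]
  rw [PySem.Dict.items_eq_map_keys _ hnodup PySem.Dict.empty, hkeys, List.map_map]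
  refine List.map_congr_left (fun g _ => ?_)
  simp only [Function.comp_apply]
  rw [outer_getD rows PySem.Dict.empty g]
  simp only [PySem.Dict.getD_empty]
  rw [← List.foldl_map (f := fun t : String × String × String => (t.2.1, t.2.2))
    (g := fun (i : PySem.Dict String (List String)) (p : String × String) => i.modify p.1 [] (· ++ [p.2]))]
  set pairs := (rows.filter (fun t => t.1 == g)).map (fun t => (t.2.1, t.2.2)) with hpairs
  have hnodup2 : ((pairs.foldl (fun i p => i.modify p.1 [] (· ++ [p.2])) PySem.Dict.empty).keys).Nodup :=
    PySem.Dict.nodup_keys_foldl_modify_key pairs (fun p => p.1) _ _ _ PySem.Dict.nodup_keys_empty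
  have hkeys2 : (pairs.foldl (fun i p => i.modify p.1 [] (· ++ [p.2])) PySem.Dict.empty).keys
      = PySem.List.dedup ((rows.filter (fun t => t.1 == g)).map (fun t => t.2.1)) := by
    rw [PySem.Dict.keys_foldl_modify_key pairs (fun p => p.1) []
      (fun _ p => (· ++ [p.2])) PySem.Dict.empty]
    simp only [PySem.Set.update_nil_left, hpairs, List.map_map, PySem.List.dedup_eq_ofList,
      PySem.Dict.keys_empty]
    rfl
  rw [PySem.Dict.items_eq_map_keys _ hnodup2 [], hkeys2]
  refine congrArg _ (List.map_congr_left (fun c _ => ?_))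
  rw [PySem.Dict.getD_foldl_modify_append pairs PySem.Dict.empty c]
  simp only [PySem.Dict.getD_empty, List.nil_append, hpairs]
  rw [List.filter_map, List.map_map, List.filter_filter]
  refine congrArg (Prod.mk c) ?_
  rw [List.filter_congr (l := rows)
    (q := fun t : String × String × String => t.1 == g && t.2.1 == c)
    (fun t _ => by simp [Bool.and_comm])]
  rfl

-- ===== VERDICT (by name: the statement is the Claim_ definition above) =====
theorem group_by_game_spec : Claim_equal_group_by_game := by
  intro table _ hpre
  unfold Spec_group_by_game
  show group_by_game table = group_by_game_alt table
  simp only [group_by_game]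
  rw [foldA_eq_rows table PySem.Dict.empty hpre, grouped_items_eq]
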